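-- pv_equiv track=rewrite | github.com/prathameshpranjale/ProgrammingPractice | codeforces_ladder/contest/Round 954/practice.py | minimal_total_distance
-- ===== SOURCE A (Python) =====
-- def minimal_total_distance(test_cases):
--     results = []
--     for x1, x2, x3 in test_cases:
--         points = sorted([x1, x2, x3])
--         median_point = points[1]
--         min_distance = abs(median_point - points[0]) + abs(median_point - points[1]) + abs(median_point - points[2])
--         results.append(min_distance)
--     return results
-- ===== SOURCE B (Python) =====
-- def minimal_total_distance(test_cases):
--     # Half the perimeter of pairwise distances: for three points on a line,
--     # |x1-x2| + |x2-x3| + |x3-x1| counts the optimal total distance twice,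
--     # so halving it gives the answer without sorting or picking a median.
--     return [(abs(x1 - x2) + abs(x2 - x3) + abs(x3 - x1)) // 2
--             for x1, x2, x3 in test_cases]
-- ===== Notes on version B (the rewrite author's own statement) =====
-- stated objective: alternative
-- what changed: Replaced the sort-then-median-then-three-distances computation with a sort-free algebraic identity: the sum of the three pairwise absolute differences is exactly twice the optimal total distance, so each result is their sum halved; no ordering of the points is ever computed.
import Mathlib
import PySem

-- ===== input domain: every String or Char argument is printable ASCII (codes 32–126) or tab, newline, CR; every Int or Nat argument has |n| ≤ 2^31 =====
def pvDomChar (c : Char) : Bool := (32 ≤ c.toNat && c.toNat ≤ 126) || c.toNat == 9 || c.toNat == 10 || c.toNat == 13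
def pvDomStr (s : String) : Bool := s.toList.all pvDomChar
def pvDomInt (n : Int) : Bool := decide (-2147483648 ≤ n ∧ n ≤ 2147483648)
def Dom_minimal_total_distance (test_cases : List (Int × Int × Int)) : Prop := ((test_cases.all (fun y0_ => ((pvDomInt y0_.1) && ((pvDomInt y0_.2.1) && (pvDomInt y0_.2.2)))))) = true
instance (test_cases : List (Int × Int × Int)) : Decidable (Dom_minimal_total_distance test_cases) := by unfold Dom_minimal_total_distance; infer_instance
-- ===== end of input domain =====

-- B drops the sort/median computation and instead halves the sum of the three pairwise
-- absolute differences (that sum double-counts the optimal total distance): alternative, same cost.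

-- ===== PORT A =====
-- one loop-body step of A: sort the three points, take the median, sum the three absolute distances.
-- points has length 3 and the literal indices 0,1,2 are in range, so pyGet? is always some;
-- .getD 0 only discharges the Option and is never the default.
def pvBodyA (x1 x2 x3 : Int) : Int :=
  let points := PySem.List.sorted [x1, x2, x3] (fun x => x) false
  let median_point := (PySem.List.pyGet? points 1).getD 0
  |median_point - (PySem.List.pyGet? points 0).getD 0| +
    |median_point - (PySem.List.pyGet? points 1).getD 0| +
    |median_point - (PySem.List.pyGet? points 2).getD 0|

def minimal_total_distance (test_cases : List (Int × Int × Int)) : List Int :=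
  test_cases.foldl (fun results t => results ++ [pvBodyA t.1 t.2.1 t.2.2]) []

-- ===== PORT B =====
def minimal_total_distance_alt (test_cases : List (Int × Int × Int)) : List Int :=
  test_cases.map (fun t =>
    PySem.Int.floordiv (|t.1 - t.2.1| + |t.2.1 - t.2.2| + |t.2.2 - t.1|) 2)

-- ===== PRECONDITION & SPEC =====
def Spec_minimal_total_distance (test_cases : List (Int × Int × Int)) (out : List Int) : Prop := out = minimal_total_distance_alt test_cases
instance (test_cases : List (Int × Int × Int)) (out : List Int) : Decidable (Spec_minimal_total_distance test_cases out) := by unfold Spec_minimal_total_distance; infer_instance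

-- ===== CLAIM (what is proved, stated in full; the proofs are below) =====
def Claim_equal_minimal_total_distance : Prop := ∀ (test_cases : List (Int × Int × Int)), Dom_minimal_total_distance test_cases → Spec_minimal_total_distance test_cases (minimal_total_distance test_cases)

-- ===== LEMMAS AND PROOFS =====

-- A's loop body on a named sorted arrangement [a, b, c] of the three points
theorem pvBody_sorted (x1 x2 x3 a b c : Int)
    (hs : PySem.List.sorted [x1, x2, x3] (fun x => x) false = [a, b, c])
    (hab : a ≤ b) (hbc : b ≤ c)
    (hsum : a + b + c = x1 + x2 + x3) :
    pvBodyA x1 x2 x3 = c - a := by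
  unfold pvBodyA
  rw [hs]
  simp [PySem.List.pyGet?, PySem.List.pyIdx?]
  simp only [Int.abs_eq_natAbs]
  omega

-- A's loop body equals half the pairwise-difference perimeter (B's per-case value)
theorem pvBodyA_eq (x1 x2 x3 : Int) :
    pvBodyA x1 x2 x3
      = PySem.Int.floordiv (|x1 - x2| + |x2 - x3| + |x3 - x1|) 2 := by
  rw [PySem.Int.floordiv_eq_ediv_of_pos (by norm_num)]
  rcases le_total x1 x2 with h12 | h12 <;> rcases le_total x1 x3 with h13 | h13 <;>
    rcases le_total x2 x3 with h23 | h23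
  · rw [pvBody_sorted x1 x2 x3 x1 x2 x3
        (PySem.List.sorted_id_eq_of_perm_of_pairwise _ _ (.refl _)
          (by simp [List.pairwise_cons]; omega))
        h12 h23 (by ring)]
    simp only [Int.abs_eq_natAbs]
    omega
  · rw [pvBody_sorted x1 x2 x3 x1 x3 x2
        (PySem.List.sorted_id_eq_of_perm_of_pairwise _ _ (.cons _ (.swap _ _ _))
          (by simp [List.pairwise_cons]; omega))
        h13 h23 (by ring)]
    simp only [Int.abs_eq_natAbs]
    omega
  · rw [pvBody_sorted x1 x2 x3 x1 x2 x3
        (PySem.List.sorted_id_eq_of_perm_of_pairwise _ _ (.refl _)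
          (by simp [List.pairwise_cons]; omega))
        h12 h23 (by ring)]
    simp only [Int.abs_eq_natAbs]
    omega
  · rw [pvBody_sorted x1 x2 x3 x3 x1 x2
        (PySem.List.sorted_id_eq_of_perm_of_pairwise _ _ ((List.Perm.swap _ _ _).trans (.cons _ (.swap _ _ _)))
          (by simp [List.pairwise_cons]; omega))
        h13 h12 (by ring)]
    simp only [Int.abs_eq_natAbs]
    omega
  · rw [pvBody_sorted x1 x2 x3 x2 x1 x3
        (PySem.List.sorted_id_eq_of_perm_of_pairwise _ _ (.swap _ _ _)
          (by simp [List.pairwise_cons]; omega))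
        h12 h13 (by ring)]
    simp only [Int.abs_eq_natAbs]
    omega
  · rw [pvBody_sorted x1 x2 x3 x1 x2 x3
        (PySem.List.sorted_id_eq_of_perm_of_pairwise _ _ (.refl _)
          (by simp [List.pairwise_cons]; omega))
        (by omega : x1 ≤ x2) (by omega : x2 ≤ x3) (by ring)]
    simp only [Int.abs_eq_natAbs]
    omega
  · rw [pvBody_sorted x1 x2 x3 x2 x3 x1
        (PySem.List.sorted_id_eq_of_perm_of_pairwise _ _ ((List.Perm.cons _ (.swap _ _ _)).trans (.swap _ _ _))
          (by simp [List.pairwise_cons]; omega))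
        h23 h13 (by ring)]
    simp only [Int.abs_eq_natAbs]
    omega
  · rw [pvBody_sorted x1 x2 x3 x3 x2 x1
        (PySem.List.sorted_id_eq_of_perm_of_pairwise _ _ ((List.Perm.swap _ _ _).trans ((List.Perm.cons _ (.swap _ _ _)).trans (.swap _ _ _)))
          (by simp [List.pairwise_cons]; omega))
        h23 h12 (by ring)]
    simp only [Int.abs_eq_natAbs]
    omega

-- A's append-accumulator fold is the map of its body
theorem foldl_append_body (test_cases : List (Int × Int × Int)) (acc : List Int) :
    test_cases.foldl (fun results t => results ++ [pvBodyA t.1 t.2.1 t.2.2]) acc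
      = acc ++ test_cases.map (fun t => pvBodyA t.1 t.2.1 t.2.2) := by
  induction test_cases generalizing acc with
  | nil => simp
  | cons h t ih => simp [List.foldl, ih]

-- ===== VERDICT (by name: the statement is the Claim_ definition above) =====
theorem minimal_total_distance_spec : Claim_equal_minimal_total_distance := by
  intro tcs _
  unfold Spec_minimal_total_distance minimal_total_distance minimal_total_distance_alt
  rw [foldl_append_body]
  simp [pvBodyA_eq]
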